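-- pv_equiv track=rewrite | github.com/TarasPrystaiko/PythonCorcesPython | LessonsCources/hl_pyauto_11apr24-main/L05/p2_list_methods.py | categorize_numbers
-- ===== SOURCE A (Python) =====
-- def categorize_numbers(numbers):
--     divisible_by_3_not_5 = []
--     divisible_by_5_not_3 = []
--     divisible_by_both_3_and_5 = []
--
--     for num in numbers:
--         if num % 3 == 0 and num % 5 != 0:
--             divisible_by_3_not_5.append(num)
--         elif num % 5 == 0 and num % 3 != 0:
--             divisible_by_5_not_3.append(num)
--         elif num % 3 == 0 and num % 5 == 0:
--             divisible_by_both_3_and_5.append(num)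
--
--     return divisible_by_3_not_5, divisible_by_5_not_3, divisible_by_both_3_and_5
-- ===== SOURCE B (Python) =====
-- def categorize_numbers(numbers):
--     return (
--         [num for num in numbers if num % 3 == 0 and num % 5 != 0],
--         [num for num in numbers if num % 5 == 0 and num % 3 != 0],
--         [num for num in numbers if num % 3 == 0 and num % 5 == 0],
--     )
-- ===== Notes on version B (the rewrite author's own statement) =====
-- stated objective: idiomatic
-- what changed: The single accumulator-maintaining loop with an if/elif chain is replaced by three independent list-comprehension filtering passes, one per category, returned as a tuple.
import Mathlib
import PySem

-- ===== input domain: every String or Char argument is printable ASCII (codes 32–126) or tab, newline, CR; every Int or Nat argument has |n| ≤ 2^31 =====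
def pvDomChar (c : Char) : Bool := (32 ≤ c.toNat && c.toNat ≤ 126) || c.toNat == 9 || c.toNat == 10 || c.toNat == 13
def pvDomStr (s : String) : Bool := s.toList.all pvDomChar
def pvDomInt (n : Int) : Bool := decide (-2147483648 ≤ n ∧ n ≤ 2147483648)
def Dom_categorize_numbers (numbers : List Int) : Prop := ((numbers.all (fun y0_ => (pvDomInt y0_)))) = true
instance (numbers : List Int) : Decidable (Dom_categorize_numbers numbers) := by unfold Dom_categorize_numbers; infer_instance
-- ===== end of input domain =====

-- B replaces A's single loop with if/elif accumulators by three independent filtering passes (idiomatic).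

-- ===== PORT A =====
-- one loop step: the if/elif chain appending num to one of the three accumulator lists
def catStepA (acc : List Int × List Int × List Int) (num : Int) : List Int × List Int × List Int :=
  if PySem.Int.mod num 3 = 0 ∧ PySem.Int.mod num 5 ≠ 0 then (acc.1 ++ [num], acc.2.1, acc.2.2)
  else if PySem.Int.mod num 5 = 0 ∧ PySem.Int.mod num 3 ≠ 0 then (acc.1, acc.2.1 ++ [num], acc.2.2)
  else if PySem.Int.mod num 3 = 0 ∧ PySem.Int.mod num 5 = 0 then (acc.1, acc.2.1, acc.2.2 ++ [num])
  else acc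

def categorize_numbers (numbers : List Int) : List Int × List Int × List Int :=
  numbers.foldl catStepA ([], [], [])

-- ===== PORT B =====
def categorize_numbers_alt (numbers : List Int) : List Int × List Int × List Int :=
  (numbers.filter (fun num => decide (PySem.Int.mod num 3 = 0 ∧ PySem.Int.mod num 5 ≠ 0)),
   numbers.filter (fun num => decide (PySem.Int.mod num 5 = 0 ∧ PySem.Int.mod num 3 ≠ 0)),
   numbers.filter (fun num => decide (PySem.Int.mod num 3 = 0 ∧ PySem.Int.mod num 5 = 0)))

-- ===== PRECONDITION & SPEC =====
def Spec_categorize_numbers (numbers : List Int) (out : List Int × List Int × List Int) : Prop := out = categorize_numbers_alt numbers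
instance (numbers : List Int) (out : List Int × List Int × List Int) : Decidable (Spec_categorize_numbers numbers out) := by unfold Spec_categorize_numbers; infer_instance

-- ===== CLAIM (what is proved, stated in full; the proofs are below) =====
def Claim_equal_categorize_numbers : Prop := ∀ (numbers : List Int), Dom_categorize_numbers numbers → Spec_categorize_numbers numbers (categorize_numbers numbers)

-- ===== LEMMAS AND PROOFS =====
theorem catFoldA_eq_filters (xs : List Int) : ∀ (a b c : List Int),
    xs.foldl catStepA (a, b, c) =
      (a ++ xs.filter (fun num => decide (PySem.Int.mod num 3 = 0 ∧ PySem.Int.mod num 5 ≠ 0)),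
       b ++ xs.filter (fun num => decide (PySem.Int.mod num 5 = 0 ∧ PySem.Int.mod num 3 ≠ 0)),
       c ++ xs.filter (fun num => decide (PySem.Int.mod num 3 = 0 ∧ PySem.Int.mod num 5 = 0))) := by
  induction xs with
  | nil => simp
  | cons x xs ih =>
    intro a b c
    by_cases d3 : (3:Int) ∣ x <;> by_cases d5 : (5:Int) ∣ x <;>
      simp [List.foldl, catStepA, d3, d5, ih]

-- ===== VERDICT (by name: the statement is the Claim_ definition above) =====
theorem categorize_numbers_spec : Claim_equal_categorize_numbers := by
  intro numbers _
  unfold Spec_categorize_numbers categorize_numbers categorize_numbers_alt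
  simp [catFoldA_eq_filters]
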